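-- pv_equiv track=rewrite | github.com/kan5/akvelon_myte | main.py | evenSubarray
-- ===== SOURCE A (Python) =====
-- def evenSubarray(numbers, k):
--     n = len(numbers)
--     count = 0
--     prefix = [0] * (n + 1)
--     odd = 0
--
--     # traverse in the array
--     for i in range(n):
--         prefix[odd] += 1
--
--         # if array element is odd
--         if (numbers[i] & 1):
--             odd += 1
--
--         for t in range(k+1):
--             # when number of odd elements>=t
--             if (odd >= t):
--                 count += prefix[odd - t]
--
--     return count
-- ===== SOURCE B (Python) =====
-- def evenSubarray(numbers, k):
--     # Counts subarrays with at most k odd elements in O(n) by maintaining a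
--     # running window sum over the prefix-odd-count histogram.
--     if k < 0:
--         return 0
--     n = len(numbers)
--     prefix = [0] * (n + 1)
--     odd = 0
--     window = 0   # = prefix[odd-k] + ... + prefix[odd]
--     count = 0
--     for x in numbers:
--         prefix[odd] += 1
--         window += 1
--         if x & 1:
--             if odd - k >= 0:
--                 window -= prefix[odd - k]
--             odd += 1
--         count += window
--     return count
-- ===== Notes on version B (the rewrite author's own statement) =====
-- stated objective: faster
-- what changed: B removes A's inner scan over t=0..k by maintaining the window sum prefix[odd-k..odd] incrementally (+1 on each histogram bump, dropping prefix[odd-k] when odd advances), turning O(n*k) into O(n).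
import Mathlib
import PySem

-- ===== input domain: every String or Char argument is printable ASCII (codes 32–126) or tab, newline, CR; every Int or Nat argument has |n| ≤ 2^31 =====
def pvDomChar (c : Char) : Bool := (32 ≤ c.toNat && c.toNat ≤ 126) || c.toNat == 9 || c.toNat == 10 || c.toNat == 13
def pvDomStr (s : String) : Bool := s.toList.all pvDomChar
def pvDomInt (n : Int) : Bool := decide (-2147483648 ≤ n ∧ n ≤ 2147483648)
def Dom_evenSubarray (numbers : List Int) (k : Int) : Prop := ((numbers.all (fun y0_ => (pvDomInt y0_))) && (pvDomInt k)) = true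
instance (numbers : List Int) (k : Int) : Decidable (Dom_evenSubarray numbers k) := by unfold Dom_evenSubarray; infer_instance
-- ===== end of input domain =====

-- B replaces A's inner scan over t = 0..k by an incrementally maintained running
-- window sum over the prefix-odd-count histogram (objective: faster, O(n*k) → O(n)).


-- ===== PORT A =====
-- loop body of A: prefix[odd] += 1; if numbers[i] & 1: odd += 1;
-- for t in range(k+1): if odd >= t: count += prefix[odd-t]
-- (the guarded prefix[odd-t] and prefix[odd] are always in range, so pyGetD/pySetD
--  with default never diverge from Python's indexing here)
def pvStepA (k : Int) (st : List Int × Int × Int) (x : Int) : List Int × Int × Int :=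
  let p := PySem.List.pySetD st.1 st.2.1 (PySem.List.pyGetD st.1 st.2.1 0 + 1)
  let odd := if PySem.Int.band x 1 ≠ 0 then st.2.1 + 1 else st.2.1
  let count := (PySem.List.pyRange 0 (k + 1) 1).foldl
      (fun c t => if odd ≥ t then c + PySem.List.pyGetD p (odd - t) 0 else c) st.2.2
  (p, odd, count)

-- 'for i in range(n)' uses i only as numbers[i]: ported as a fold over the list itself
def evenSubarray (numbers : List Int) (k : Int) : Int :=
  (numbers.foldl (pvStepA k) (List.replicate (numbers.length + 1) 0, 0, 0)).2.2

-- ===== PORT B =====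
-- loop body of B: state (prefix, odd, window, count)
def pvStepB (k : Int) (st : List Int × Int × Int × Int) (x : Int) : List Int × Int × Int × Int :=
  let p := PySem.List.pySetD st.1 st.2.1 (PySem.List.pyGetD st.1 st.2.1 0 + 1)
  let w := st.2.2.1 + 1
  if PySem.Int.band x 1 ≠ 0 then
    let w' := if st.2.1 - k ≥ 0 then w - PySem.List.pyGetD p (st.2.1 - k) 0 else w
    (p, st.2.1 + 1, w', st.2.2.2 + w')
  else
    (p, st.2.1, w, st.2.2.2 + w)

def evenSubarray_alt (numbers : List Int) (k : Int) : Int :=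
  if k < 0 then 0
  else (numbers.foldl (pvStepB k) (List.replicate (numbers.length + 1) 0, 0, 0, 0)).2.2.2

-- ===== PRECONDITION & SPEC =====
def Spec_evenSubarray (numbers : List Int) (k : Int) (out : Int) : Prop := out = evenSubarray_alt numbers k
instance (numbers : List Int) (k : Int) (out : Int) : Decidable (Spec_evenSubarray numbers k out) := by unfold Spec_evenSubarray; infer_instance

-- ===== CLAIM (what is proved, stated in full; the proofs are below) =====
def Claim_equal_evenSubarray : Prop := ∀ (numbers : List Int) (k : Int), Dom_evenSubarray numbers k → Spec_evenSubarray numbers k (evenSubarray numbers k)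

-- ===== LEMMAS AND PROOFS =====

-- the window sum Σ_{t=0..k, odd≥t} prefix[odd-t] that B maintains incrementally
def pvWinSum (p : List Int) (o k : Int) : Int :=
  ((List.range (k.toNat + 1)).map
    (fun (t : Nat) => if o ≥ (t : Int) then PySem.List.pyGetD p (o - (t : Int)) 0 else 0)).sum

-- generic: a guarded accumulating fold is the start value plus a sum
theorem pv_foldl_ite_add (l : List Nat) (P : Nat → Prop) [DecidablePred P]
    (g : Nat → Int) (c : Int) :
    l.foldl (fun acc t => if P t then acc + g t else acc) c
      = c + (l.map (fun t => if P t then g t else 0)).sum := by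
  induction l generalizing c with
  | nil => simp
  | cons h t ih => simp only [List.foldl_cons, List.map_cons, List.sum_cons, ih]; split <;> ring

-- A's inner loop equals count + pvWinSum
theorem pv_innerA (k : Int) (hk : 0 ≤ k) (p : List Int) (o c : Int) :
    (PySem.List.pyRange 0 (k + 1) 1).foldl
        (fun c t => if o ≥ t then c + PySem.List.pyGetD p (o - t) 0 else c) c
      = c + pvWinSum p o k := by
  have hb : k + 1 - 0 = ((k.toNat + 1 : Nat) : Int) := by omega
  rw [PySem.List.pyRange_one, hb]
  simp only [Int.toNat_natCast, List.foldl_map, zero_add]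
  rw [pv_foldl_ite_add (List.range (k.toNat + 1)) (fun t => o ≥ (t : Int))
      (fun t => PySem.List.pyGetD p (o - (t : Int)) 0) c]
  rfl

-- bumping prefix[o] adds exactly 1 to the window sum (the t = 0 term)
theorem pv_winSum_bump (p : List Int) (o k : Int) (ho : 0 ≤ o) (hlen : o.toNat < p.length) :
    pvWinSum (p.set o.toNat (p.getD o.toNat 0 + 1)) o k = pvWinSum p o k + 1 := by
  unfold pvWinSum
  rw [List.range_succ_eq_map]
  simp only [List.map_cons, List.sum_cons, List.map_map]
  have htail : ((fun (t : Nat) => if o ≥ (t : Int) then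
        PySem.List.pyGetD (p.set o.toNat (p.getD o.toNat 0 + 1)) (o - (t : Int)) 0 else 0) ∘ Nat.succ)
      = ((fun (t : Nat) => if o ≥ (t : Int) then PySem.List.pyGetD p (o - (t : Int)) 0 else 0) ∘ Nat.succ) := by
    funext t
    simp only [Function.comp]
    by_cases h : o ≥ ((Nat.succ t : Nat) : Int)
    · rw [if_pos h, if_pos h]
      have h0 : (0:Int) ≤ o - (Nat.succ t : Nat) := by omega
      rw [PySem.List.pyGetD_of_nonneg _ _ h0, PySem.List.pyGetD_of_nonneg _ _ h0]
      have hne : o.toNat ≠ (o - (Nat.succ t : Nat)).toNat := by omega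
      rw [List.getD_eq_getElem?_getD, List.getD_eq_getElem?_getD, List.getElem?_set, if_neg hne]
      exact List.getD_eq_getElem?_getD.symm
    · rw [if_neg h, if_neg h]
  rw [htail]
  have hhead : (if o ≥ ((0:Nat) : Int) then
      PySem.List.pyGetD (p.set o.toNat (p.getD o.toNat 0 + 1)) (o - ((0:Nat):Int)) 0 else 0)
      = (if o ≥ ((0:Nat) : Int) then PySem.List.pyGetD p (o - ((0:Nat):Int)) 0 else 0) + 1 := by
    rw [if_pos (by omega), if_pos (by omega)]
    simp only [Nat.cast_zero, sub_zero]
    rw [PySem.List.pyGetD_of_nonneg _ _ ho, PySem.List.pyGetD_of_nonneg _ _ ho]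
    rw [List.getD_eq_getElem?_getD, List.getD_eq_getElem?_getD, List.getElem?_set,
        if_pos rfl, if_pos hlen]
    simp
  rw [hhead]
  ring

-- an all-zero prefix histogram has window sum 0
theorem pv_winSum_zeroes (p : List Int) (o k : Int)
    (hz : ∀ j : Nat, p.getD j 0 = 0) : pvWinSum p o k = 0 := by
  unfold pvWinSum
  apply List.sum_eq_zero
  intro x hx
  simp only [List.mem_map] at hx
  obtain ⟨t, _, rfl⟩ := hx
  by_cases h : o ≥ (t : Int)
  · rw [if_pos h, PySem.List.pyGetD_of_nonneg _ _ (by omega), hz]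
  · rw [if_neg h]

-- advancing odd shifts the window: gain prefix[o+1], drop prefix[o-k]
theorem pv_winSum_shift (p : List Int) (o k : Int) (hk : 0 ≤ k) (ho : 0 ≤ o) :
    pvWinSum p (o + 1) k
      = pvWinSum p o k + p.getD (o + 1).toNat 0
        - (if o - k ≥ 0 then PySem.List.pyGetD p (o - k) 0 else 0) := by
  unfold pvWinSum
  conv_lhs => rw [List.range_succ_eq_map]
  conv_rhs => rw [List.range_succ]
  simp only [List.map_cons, List.sum_cons, List.map_map, List.map_append, List.sum_append,
    List.map_cons, List.sum_cons, List.map_nil, List.sum_nil]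
  have htail : ((fun (t : Nat) => if o + 1 ≥ (t : Int) then PySem.List.pyGetD p (o + 1 - (t : Int)) 0 else 0) ∘ Nat.succ)
      = (fun (t : Nat) => if o ≥ (t : Int) then PySem.List.pyGetD p (o - (t : Int)) 0 else 0) := by
    funext t
    simp only [Function.comp]
    have hiff : (o + 1 ≥ ((Nat.succ t : Nat) : Int)) ↔ (o ≥ (t : Int)) := by
      push_cast; omega
    have hidx : o + 1 - ((Nat.succ t : Nat) : Int) = o - (t : Int) := by push_cast; ring
    rw [hidx, if_congr hiff rfl rfl]
  rw [htail]
  have hhead : (if o + 1 ≥ ((0:Nat):Int) then PySem.List.pyGetD p (o + 1 - ((0:Nat):Int)) 0 else 0)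
      = p.getD (o + 1).toNat 0 := by
    rw [if_pos (by simp; omega)]
    simp only [Nat.cast_zero, sub_zero]
    exact PySem.List.pyGetD_of_nonneg _ _ (by omega)
  have hlast : (if o ≥ ((k.toNat : Nat) : Int) then PySem.List.pyGetD p (o - ((k.toNat : Nat) : Int)) 0 else 0)
      = (if o - k ≥ 0 then PySem.List.pyGetD p (o - k) 0 else 0) := by
    have hkk : ((k.toNat : Nat) : Int) = k := by omega
    rw [hkk]
    exact if_congr (by omega) rfl rfl
  rw [hhead, hlast]
  ring

-- one step of A, with its inner loop summed up
theorem pv_stepA_eq (k x : Int) (p : List Int) (o c : Int) (hk : 0 ≤ k) (ho : 0 ≤ o) :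
    pvStepA k (p, o, c) x
      = ((p.set o.toNat (p.getD o.toNat 0 + 1)),
         (if PySem.Int.band x 1 ≠ 0 then o + 1 else o),
         c + pvWinSum (p.set o.toNat (p.getD o.toNat 0 + 1))
               (if PySem.Int.band x 1 ≠ 0 then o + 1 else o) k) := by
  unfold pvStepA
  simp only [PySem.List.pySetD_of_nonneg _ _ ho, PySem.List.pyGetD_of_nonneg _ _ ho]
  rw [pv_innerA k hk]

-- one step of B, with the Int-indexed primitives normalised
theorem pv_stepB_eq (k x : Int) (p : List Int) (o w c : Int) (ho : 0 ≤ o) :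
    pvStepB k (p, o, w, c) x
      = (let p' := p.set o.toNat (p.getD o.toNat 0 + 1);
         if PySem.Int.band x 1 ≠ 0 then
           let w' := if o - k ≥ 0 then w + 1 - PySem.List.pyGetD p' (o - k) 0 else w + 1;
           (p', o + 1, w', c + w')
         else (p', o, w + 1, c + (w + 1))) := by
  unfold pvStepB
  simp only [PySem.List.pySetD_of_nonneg _ _ ho, PySem.List.pyGetD_of_nonneg _ _ ho]

-- main loop invariant: same prefix/odd/count and B's window = pvWinSum ⟹ same count
theorem pv_loop (k : Int) (hk : 0 ≤ k) (xs : List Int) :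
    ∀ (p : List Int) (o c : Int), 0 ≤ o → o.toNat + xs.length < p.length →
    (∀ j : Nat, o.toNat < j → p.getD j 0 = 0) →
    (xs.foldl (pvStepA k) (p, o, c)).2.2
      = (xs.foldl (pvStepB k) (p, o, pvWinSum p o k, c)).2.2.2 := by
  induction xs with
  | nil => intro p o c _ _ _; rfl
  | cons x xs ih =>
    intro p o c ho hlen hz
    have hol : o.toNat < p.length := by simp at hlen; omega
    rw [List.foldl_cons, List.foldl_cons, pv_stepA_eq k x p o c hk ho,
        pv_stepB_eq k x p o (pvWinSum p o k) c ho]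
    simp only []
    have hbump : pvWinSum (p.set o.toNat (p.getD o.toNat 0 + 1)) o k = pvWinSum p o k + 1 :=
      pv_winSum_bump p o k ho hol
    have hz' : ∀ j : Nat, o.toNat < j → (p.set o.toNat (p.getD o.toNat 0 + 1)).getD j 0 = 0 := by
      intro j hj
      rw [List.getD_eq_getElem?_getD, List.getElem?_set, if_neg (by omega)]
      rw [← List.getD_eq_getElem?_getD]
      exact hz j hj
    by_cases hpar : PySem.Int.band x 1 ≠ 0
    · rw [if_pos hpar, if_pos hpar]
      have hshift := pv_winSum_shift (p.set o.toNat (p.getD o.toNat 0 + 1)) o k hk ho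
      have hzero : (p.set o.toNat (p.getD o.toNat 0 + 1)).getD (o + 1).toNat 0 = 0 :=
        hz' (o + 1).toNat (by omega)
      have hw : (if o - k ≥ 0 then
            pvWinSum p o k + 1 - PySem.List.pyGetD (p.set o.toNat (p.getD o.toNat 0 + 1)) (o - k) 0
          else pvWinSum p o k + 1)
          = pvWinSum (p.set o.toNat (p.getD o.toNat 0 + 1)) (o + 1) k := by
        rw [hshift, hbump, hzero]
        split <;> ring
      rw [hw]
      exact ih _ _ _ (by omega) (by simp at hlen ⊢; omega) (fun j hj => hz' j (by omega))
    · rw [if_neg hpar, if_neg hpar]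
      have hw : pvWinSum p o k + 1 = pvWinSum (p.set o.toNat (p.getD o.toNat 0 + 1)) o k :=
        hbump.symm
      rw [hw]
      exact ih _ _ _ ho (by simp at hlen ⊢; omega) hz'

-- with k < 0, A's inner range(k+1) is empty, so its count never changes
theorem pv_kneg (k : Int) (hk : k < 0) (xs : List Int) :
    ∀ (st : List Int × Int × Int), (xs.foldl (pvStepA k) st).2.2 = st.2.2 := by
  intro st
  induction xs generalizing st with
  | nil => rfl
  | cons h t ih =>
      rw [List.foldl_cons, ih]
      simp [pvStepA, PySem.List.pyRange_one_eq_nil (by omega : k + 1 ≤ (0:Int))]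

-- ===== VERDICT (by name: the statement is the Claim_ definition above) =====
theorem evenSubarray_spec : Claim_equal_evenSubarray := by
  intro numbers k _
  unfold Spec_evenSubarray evenSubarray evenSubarray_alt
  by_cases hk : k < 0
  · rw [if_pos hk, pv_kneg k hk]
  · rw [if_neg hk]
    have hk' : 0 ≤ k := by omega
    have h0 : pvWinSum (List.replicate (numbers.length + 1) 0) 0 k = 0 := by
      apply pv_winSum_zeroes
      intro j
      rw [List.getD_eq_getElem?_getD, List.getElem?_replicate]
      split <;> rfl
    have hmain := pv_loop k hk' numbers (List.replicate (numbers.length + 1) 0) 0 0 le_rfl (by simp) (by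
      intro j _
      rw [List.getD_eq_getElem?_getD, List.getElem?_replicate]
      split <;> rfl)
    rw [h0] at hmain
    exact hmain
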